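-- pv_equiv track=rewrite | github.com/2025-I/proyecto-1-ada-ii-2025-i-lorem-ipsum-dolor-sit-amet | tests/test_problema2.py | verificar_restricciones
-- ===== SOURCE A (Python) =====
-- def verificar_restricciones(relaciones, salida):
--     invitados = [i for i, x in enumerate(salida[:-1]) if x == 1]
--     for emp in invitados:
--         for supervisor in range(len(relaciones)):
--             if relaciones[supervisor][emp] == 1 and supervisor in invitados:
--                 return False
--         for subordinado in range(len(relaciones)):
--             if relaciones[emp][subordinado] == 1 and subordinado in invitados:
--                 return False
--     return True
-- ===== SOURCE B (Python) =====
-- def verificar_restricciones(relaciones, salida):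
--     def invitado(i):
--         return 0 <= i < len(salida) - 1 and salida[i] == 1
--     for i, fila in enumerate(relaciones):
--         if invitado(i):
--             for j, v in enumerate(fila):
--                 if v == 1 and invitado(j):
--                     return False
--     return True
-- ===== Notes on version B (the rewrite author's own statement) =====
-- stated objective: faster
-- what changed: B drops A's invited-index list, range scans and membership tests entirely: it scans the relation matrix once with enumerate and an O(1) invitado(i) predicate recomputed from salida, failing on any 1-entry whose row and column indices are both invited (self-pairs included, as in A); removing the linear 'in invitados' scan from the inner loop is the speed mechanism.
-- outside the precondition, e.g. on verificar_restricciones([], [1, 0]): A returns True, B returns True; on verificar_restricciones([[1, 1], [1]], [1, 1, 0]): A returns False, B returns False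
import Mathlib
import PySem

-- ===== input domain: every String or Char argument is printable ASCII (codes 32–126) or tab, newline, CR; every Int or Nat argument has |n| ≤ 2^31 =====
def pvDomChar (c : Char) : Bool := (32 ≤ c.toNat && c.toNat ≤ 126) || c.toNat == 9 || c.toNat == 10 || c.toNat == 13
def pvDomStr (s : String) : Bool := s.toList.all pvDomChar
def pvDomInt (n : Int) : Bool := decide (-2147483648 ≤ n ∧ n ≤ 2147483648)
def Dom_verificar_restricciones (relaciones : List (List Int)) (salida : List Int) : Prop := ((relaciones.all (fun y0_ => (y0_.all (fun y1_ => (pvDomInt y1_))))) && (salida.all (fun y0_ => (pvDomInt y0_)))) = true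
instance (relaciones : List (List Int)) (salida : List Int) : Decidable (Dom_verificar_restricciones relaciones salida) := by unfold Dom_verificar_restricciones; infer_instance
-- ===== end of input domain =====

-- B replaces A's invited-list + membership-filtered range scans by a single enumerate pass over
-- the matrix with an invitado predicate (simpler); equivalence proved on well-shaped inputs (Pre_).


-- ===== PORT A =====
def verificar_restricciones (relaciones : List (List Int)) (salida : List Int) : Bool :=
  let invitados :=
    ((PySem.List.enumerate (PySem.List.slice salida none (some (-1))) 0).filter
      (fun p => p.2 == 1)).map (fun p => p.1)
  -- 'for … return False' loops become List.any; in-range under Pre_, so pyGetD defaults unused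
  !(invitados.any (fun emp =>
      (PySem.List.pyRange 0 (relaciones.length : Int) 1).any (fun supervisor =>
        (PySem.List.pyGetD (PySem.List.pyGetD relaciones supervisor []) emp 0 == 1)
          && invitados.contains supervisor)
      || (PySem.List.pyRange 0 (relaciones.length : Int) 1).any (fun subordinado =>
        (PySem.List.pyGetD (PySem.List.pyGetD relaciones emp []) subordinado 0 == 1)
          && invitados.contains subordinado)))

-- ===== PORT B =====
-- Python's 'invitado(i)' helper: 0 <= i < len(salida)-1 and salida[i] == 1
def vrInvitado (salida : List Int) (i : Int) : Bool :=
  decide (0 ≤ i) && decide (i < (salida.length : Int) - 1)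
    && (PySem.List.pyGetD salida i 0 == 1)

def verificar_restricciones_alt (relaciones : List (List Int)) (salida : List Int) : Bool :=
  !((PySem.List.enumerate relaciones 0).any (fun p =>
      vrInvitado salida p.1 &&
      (PySem.List.enumerate p.2 0).any (fun q =>
        (q.2 == 1) && vrInvitado salida q.1)))

-- ===== PRECONDITION & SPEC =====
-- Pre_ excludes ill-shaped inputs (an invited index that is not a valid row index, or a row
-- shorter than the matrix): there A's full-range scans can raise IndexError, and whether A
-- raises or still returns depends on the order its scans hit the bad index.
def Pre_verificar_restricciones (relaciones : List (List Int)) (salida : List Int) : Prop :=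
  (∀ i : Fin salida.length, (i : Nat) + 1 < salida.length → salida[i] = 1 →
      (i : Nat) < relaciones.length) ∧
  ((∃ i : Fin salida.length, (i : Nat) + 1 < salida.length ∧ salida[i] = 1) →
      ∀ row ∈ relaciones, relaciones.length ≤ row.length)
instance (relaciones : List (List Int)) (salida : List Int) : Decidable (Pre_verificar_restricciones relaciones salida) := by unfold Pre_verificar_restricciones; infer_instance

def pvWitness_verificar_restricciones : List (List Int) × List Int := ([[0]], [1, 0])

def Spec_verificar_restricciones (relaciones : List (List Int)) (salida : List Int) (out : Bool) : Prop := out = verificar_restricciones_alt relaciones salida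
instance (relaciones : List (List Int)) (salida : List Int) (out : Bool) : Decidable (Spec_verificar_restricciones relaciones salida out) := by unfold Spec_verificar_restricciones; infer_instance

-- ===== CLAIM (what is proved, stated in full; the proofs are below) =====
def Claim_equal_verificar_restricciones : Prop := ∀ (relaciones : List (List Int)) (salida : List Int), Dom_verificar_restricciones relaciones salida → Pre_verificar_restricciones relaciones salida → Spec_verificar_restricciones relaciones salida (verificar_restricciones relaciones salida)

-- ===== LEMMAS AND PROOFS =====

-- membership in A's invitados list, characterised
theorem mem_invitados {salida : List Int} {e : Int} :
    (e ∈ ((PySem.List.enumerate (PySem.List.slice salida none (some (-1))) 0).filter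
      (fun p => p.2 == 1)).map (fun p => p.1)) ↔
    ∃ k : Nat, e = (k : Int) ∧ ∃ hk : k + 1 < salida.length, salida[k] = 1 := by
  rw [PySem.List.slice_to_neg_one]
  simp only [List.mem_map, List.mem_filter, PySem.List.mem_enumerate_iff]
  constructor
  · rintro ⟨p, ⟨⟨k, hk, hp⟩, h1⟩, he⟩
    subst hp
    simp only [beq_iff_eq] at h1
    have hd : k < salida.length - 1 := salida.length_dropLast ▸ hk
    refine ⟨k, by simpa using he.symm, by omega, ?_⟩
    simpa using h1
  · rintro ⟨k, rfl, hk, h1⟩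
    have hd : k < salida.dropLast.length := by simp [List.length_dropLast]; omega
    refine ⟨((k : Int), salida.dropLast[k]), ⟨⟨k, hd, by simp⟩, ?_⟩, rfl⟩
    simp [List.getElem_dropLast, h1]

-- A's invited indices are valid row indices under Pre_
theorem invitados_lt {relaciones : List (List Int)} {salida : List Int}
    (hp : Pre_verificar_restricciones relaciones salida) {e : Int}
    (h : e ∈ ((PySem.List.enumerate (PySem.List.slice salida none (some (-1))) 0).filter
      (fun p => p.2 == 1)).map (fun p => p.1)) :
    0 ≤ e ∧ e < (relaciones.length : Int) := by
  obtain ⟨k, rfl, hlt, h1⟩ := mem_invitados.1 h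
  have := hp.1 ⟨k, by omega⟩ hlt h1
  exact ⟨by positivity, by exact_mod_cast this⟩

-- vrInvitado ↔ membership in A's invitados list
theorem vrInvitado_iff_mem {salida : List Int} {e : Int} :
    vrInvitado salida e = true ↔
    (e ∈ ((PySem.List.enumerate (PySem.List.slice salida none (some (-1))) 0).filter
      (fun p => p.2 == 1)).map (fun p => p.1)) := by
  rw [mem_invitados]
  unfold vrInvitado
  simp only [Bool.and_eq_true, decide_eq_true_eq, beq_iff_eq]
  constructor
  · rintro ⟨⟨h0, hlt⟩, h1⟩
    obtain ⟨n, rfl⟩ := Int.eq_ofNat_of_zero_le h0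
    refine ⟨n, rfl, by omega, ?_⟩
    rw [PySem.List.pyGetD_natCast] at h1
    simpa [List.getD_eq_getElem?_getD,
      List.getElem?_eq_getElem (show n < salida.length by omega)] using h1
  · rintro ⟨k, rfl, hk, h1⟩
    refine ⟨⟨by positivity, by omega⟩, ?_⟩
    rw [PySem.List.pyGetD_natCast]
    simpa [List.getD_eq_getElem?_getD, List.getElem?_eq_getElem (by omega : k < salida.length)]
      using h1

-- ===== VERDICT (by name: the statement is the Claim_ definition above) =====
theorem verificar_restricciones_spec : Claim_equal_verificar_restricciones := by
  intro relaciones salida _hdom hpre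
  unfold Spec_verificar_restricciones verificar_restricciones verificar_restricciones_alt
  set invitados := ((PySem.List.enumerate (PySem.List.slice salida none (some (-1))) 0).filter
      (fun p => p.2 == 1)).map (fun p => p.1) with hinv
  have key :
      (invitados.any (fun emp =>
        (PySem.List.pyRange 0 (relaciones.length : Int) 1).any (fun supervisor =>
          (PySem.List.pyGetD (PySem.List.pyGetD relaciones supervisor []) emp 0 == 1)
            && invitados.contains supervisor)
        || (PySem.List.pyRange 0 (relaciones.length : Int) 1).any (fun subordinado =>
          (PySem.List.pyGetD (PySem.List.pyGetD relaciones emp []) subordinado 0 == 1)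
            && invitados.contains subordinado)))
      = ((PySem.List.enumerate relaciones 0).any (fun p =>
          vrInvitado salida p.1 &&
          (PySem.List.enumerate p.2 0).any (fun q =>
            (q.2 == 1) && vrInvitado salida q.1))) := by
    rw [Bool.eq_iff_iff]
    simp only [List.any_eq_true, Bool.or_eq_true, Bool.and_eq_true, beq_iff_eq,
      PySem.List.mem_pyRange_one, List.contains_eq_mem, decide_eq_true_eq,
      PySem.List.mem_enumerate_iff]
    constructor
    · -- A found a bad pair (a, b) of invited indices with relaciones[a][b] == 1
      have toB : ∀ a b : Int, a ∈ invitados → b ∈ invitados →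
          PySem.List.pyGetD (PySem.List.pyGetD relaciones a []) b 0 = 1 →
          ∃ p, (∃ k : Nat, ∃ h : k < relaciones.length, p = ((0 : Int) + k, relaciones[k])) ∧
            vrInvitado salida p.1 = true ∧
            ∃ q, (∃ k : Nat, ∃ h : k < p.2.length, q = ((0 : Int) + k, p.2[k])) ∧
              q.2 = 1 ∧ vrInvitado salida q.1 = true := by
        intro a b ha hb hg
        obtain ⟨ka, rfl, hka, h1a⟩ := mem_invitados.1 ha
        obtain ⟨kb, rfl, hkb, h1b⟩ := mem_invitados.1 hb
        have hra : ka < relaciones.length := hpre.1 ⟨ka, by omega⟩ hka h1a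
        have hrb : kb < relaciones.length := hpre.1 ⟨kb, by omega⟩ hkb h1b
        have hrow : relaciones.length ≤ relaciones[ka].length :=
          hpre.2 ⟨⟨ka, by omega⟩, hka, h1a⟩ _ (List.getElem_mem hra)
        refine ⟨((ka : Int), relaciones[ka]), ⟨ka, hra, by simp⟩,
          vrInvitado_iff_mem.2 ha, ((kb : Int), relaciones[ka][kb]), ⟨kb, by simp; omega, by simp⟩,
          ?_, vrInvitado_iff_mem.2 hb⟩
        rw [PySem.List.pyGetD_natCast, PySem.List.pyGetD_natCast] at hg
        simpa [List.getD_eq_getElem?_getD, List.getElem?_eq_getElem hra,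
          List.getElem?_eq_getElem (show kb < relaciones[ka].length by omega)] using hg
      rintro ⟨emp, hemp, ⟨s, _hs, hg, hsin⟩ | ⟨t, _ht, hg, htin⟩⟩
      · exact toB s emp hsin hemp hg
      · exact toB emp t hemp htin hg
    · -- B found a 1-entry of the matrix whose row and column indices are both invited
      rintro ⟨p, ⟨i, hi, rfl⟩, hinvi, q, ⟨j, hj, rfl⟩, hq1, hinvj⟩
      simp only [zero_add] at *
      have hmi : (i : Int) ∈ invitados := vrInvitado_iff_mem.1 hinvi
      have hmj : (j : Int) ∈ invitados := vrInvitado_iff_mem.1 hinvj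
      have hjlt : 0 ≤ (j : Int) ∧ (j : Int) < (relaciones.length : Int) :=
        invitados_lt hpre hmj
      refine ⟨(j : Int), hmj, Or.inl ⟨(i : Int), ⟨by positivity, by exact_mod_cast hi⟩, ?_, hmi⟩⟩
      rw [PySem.List.pyGetD_natCast, PySem.List.pyGetD_natCast]
      simpa [List.getD_eq_getElem?_getD, List.getElem?_eq_getElem hi,
        List.getElem?_eq_getElem hj] using hq1
  exact congrArg Bool.not key
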